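-- pv_equiv track=rewrite | github.com/200soo/SWP2 | 20191481/4주차(2).py | solution
-- ===== SOURCE A (Python) =====
-- def solution(list):
--     answer = []
--     cnt = [0] * max(list)
--
--     for i in list:
--         cnt[i-1] = cnt[i-1] + 1
--
--     if max(cnt) == 1:
--         return answer
--     else:
--         num = 0
--         for j in cnt:
--             num += 1
--             if j == max(cnt):
--                 answer.append(num)
--
--     return answer
-- ===== SOURCE B (Python) =====
-- def solution(list):
--     cnt = [0] * max(list)
--     for i in list:
--         cnt[i-1] = cnt[i-1] + 1
--     groups = {}
--     for pos, c in enumerate(cnt, 1):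
--         groups.setdefault(c, []).append(pos)
--     top = max(groups)
--     return [] if top == 1 else groups[top]
-- ===== Notes on version B (the rewrite author's own statement) =====
-- stated objective: faster
-- what changed: B keeps the same counting array but replaces A's output loop, which recomputes max(cnt) on every iteration while filtering positions, with one pass building an inverted count->positions dict followed by a max over its keys and a single lookup.
import Mathlib
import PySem

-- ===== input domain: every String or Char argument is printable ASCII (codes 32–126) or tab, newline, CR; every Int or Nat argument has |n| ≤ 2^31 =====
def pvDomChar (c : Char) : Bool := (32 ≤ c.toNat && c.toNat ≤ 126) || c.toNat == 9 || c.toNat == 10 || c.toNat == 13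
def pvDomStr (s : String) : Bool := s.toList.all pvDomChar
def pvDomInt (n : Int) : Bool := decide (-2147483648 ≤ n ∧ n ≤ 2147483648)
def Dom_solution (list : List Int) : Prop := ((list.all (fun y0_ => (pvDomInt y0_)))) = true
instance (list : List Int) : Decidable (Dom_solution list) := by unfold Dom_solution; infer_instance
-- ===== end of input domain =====

-- B keeps A's counting array but replaces the filter loop that recomputes max(cnt) each
-- iteration with an inverted count->positions dict built in one pass (objective: faster).


-- ===== PORT A =====
def solution (list : List Int) : List Int :=
  match PySem.List.max? list (fun x => x) with
  | none => []  -- max([]) raises ValueError: excluded by Pre_solution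
  | some m =>
    let cnt := list.foldl
      (fun c i => PySem.List.pySetD c (i - 1) (PySem.List.pyGetD c (i - 1) 0 + 1))
      (List.replicate m.toNat (0 : Int))
    if PySem.List.max? cnt (fun x => x) = some 1 then []
    else
      (cnt.foldl
        (fun st j =>
          (st.1 + 1,
           if some j = PySem.List.max? cnt (fun x => x) then st.2 ++ [st.1 + 1] else st.2))
        ((0 : Int), ([] : List Int))).2

-- ===== PORT B =====
def solution_alt (list : List Int) : List Int :=
  match PySem.List.max? list (fun x => x) with
  | none => []  -- max([]) raises ValueError: excluded by Pre_solution
  | some m =>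
    let cnt := list.foldl
      (fun c i => PySem.List.pySetD c (i - 1) (PySem.List.pyGetD c (i - 1) 0 + 1))
      (List.replicate m.toNat (0 : Int))
    let groups : PySem.Dict Int (List Int) :=
      (PySem.List.enumerate cnt 1).foldl
        (fun d pc => d.modify pc.2 [] (· ++ [pc.1])) PySem.Dict.empty
    match PySem.List.max? (PySem.Dict.keys groups) (fun x => x) with
    | none => []  -- unreachable under Pre_solution: groups is nonempty
    | some top =>
      if top = 1 then []
      else
        match PySem.Dict.get? groups top with
        | some ps => ps
        | none => []  -- unreachable: top is a key of groups

-- ===== PRECONDITION & SPEC =====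
-- the running max of the list (the value Python's max(list) returns on a nonempty list)
def pvMax (l : List Int) : Int := l.foldl max (l.headD 0)
-- Pre_ excludes exactly the inputs where A raises: the empty list (ValueError from max),
-- lists whose maximum m is < 1 (cnt = [] and cnt[i-1] raises IndexError), and lists with an
-- element i < 1 - m (cnt[i-1] raises IndexError even with Python's negative-index wrap).
def Pre_solution (list : List Int) : Prop :=
  list ≠ [] ∧ 1 ≤ pvMax list ∧ ∀ i ∈ list, 1 - pvMax list ≤ i
instance (list : List Int) : Decidable (Pre_solution list) := by
  unfold Pre_solution; infer_instance
def pvWitness_solution : List Int := [1, 2, 2]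
def Spec_solution (list : List Int) (out : List Int) : Prop := out = solution_alt list
instance (list : List Int) (out : List Int) : Decidable (Spec_solution list out) := by
  unfold Spec_solution; infer_instance

-- ===== CLAIM (what is proved, stated in full; the proofs are below) =====
def Claim_equal_solution : Prop :=
  ∀ (list : List Int), Dom_solution list → Pre_solution list → Spec_solution list (solution list)

-- ===== LEMMAS AND PROOFS =====

-- the counting loop preserves the length of cnt
theorem pvLen_cntLoop (l : List Int) (c : List Int) :
    (l.foldl (fun c i => PySem.List.pySetD c (i - 1) (PySem.List.pyGetD c (i - 1) 0 + 1)) c).length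
      = c.length := by
  induction l generalizing c with
  | nil => rfl
  | cons x t ih => simp [List.foldl_cons, ih, PySem.List.length_pySetD]

-- max? with the identity key depends only on membership
theorem pvMax?_congr_mem {xs ys : List Int} (h : ∀ x, x ∈ xs ↔ x ∈ ys) :
    PySem.List.max? xs (fun x => x) = PySem.List.max? ys (fun x => x) := by
  rcases hx : PySem.List.max? xs (fun x => x) with _ | a
  · rcases hy : PySem.List.max? ys (fun x => x) with _ | b
    · rfl
    · rw [PySem.List.max?_eq_none_iff] at hx
      have hb := PySem.List.max?_mem hy
      rw [← h] at hb
      simp [hx] at hb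
  · rcases hy : PySem.List.max? ys (fun x => x) with _ | b
    · rw [PySem.List.max?_eq_none_iff] at hy
      have ha := PySem.List.max?_mem hx
      rw [h] at ha
      simp [hy] at ha
    · have ha := PySem.List.max?_mem hx
      have hb := PySem.List.max?_mem hy
      have h1 := PySem.List.max?_isMax hx b (by rw [h]; exact hb)
      have h2 := PySem.List.max?_isMax hy a (by rw [← h]; exact ha)
      have hab : a = b := le_antisymm (by simpa using h2) (by simpa using h1)
      rw [hab]

-- A's output loop: positions (1-based, counted from n+1) whose count equals M
theorem pvLoopA (l : List Int) (M : Int) (n : Int) (acc : List Int) :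
    (l.foldl (fun st j => (st.1 + 1, if j = M then st.2 ++ [st.1 + 1] else st.2))
      ((n : Int), acc)).2
      = acc ++ ((PySem.List.enumerate l (n + 1)).filter (fun p => p.2 == M)).map (·.1) := by
  induction l generalizing n acc with
  | nil => simp [PySem.List.enumerate_nil]
  | cons x t ih =>
    rw [PySem.List.enumerate_cons]
    by_cases hx : x = M
    · simp [List.foldl_cons, hx, ih, add_assoc]
    · simp [List.foldl_cons, hx, ih, add_assoc]

-- ===== VERDICT (by name: the statement is the Claim_ definition above) =====
theorem solution_spec : Claim_equal_solution := by
  intro list _ hpre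
  obtain ⟨hne, hm1, _⟩ := hpre
  -- Python's max(list) is the running max pvMax list
  have hmax : PySem.List.max? list (fun x => x) = some (pvMax list) := by
    rcases list with _ | ⟨x, t⟩
    · exact absurd rfl hne
    · rw [PySem.List.max?_id_cons]
      simp [pvMax]
  unfold Spec_solution solution solution_alt
  rw [hmax]
  simp only
  set cnt := list.foldl
      (fun c i => PySem.List.pySetD c (i - 1) (PySem.List.pyGetD c (i - 1) 0 + 1))
      (List.replicate (pvMax list).toNat (0 : Int)) with hcnt
  -- cnt is nonempty, so max? cnt is some M
  have hlen : cnt.length = (pvMax list).toNat := by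
    rw [hcnt, pvLen_cntLoop]; simp
  have hcne : cnt ≠ [] := by
    intro h
    rw [h] at hlen
    simp at hlen
    omega
  obtain ⟨M, hM⟩ : ∃ M, PySem.List.max? cnt (fun x => x) = some M := by
    rcases h : PySem.List.max? cnt (fun x => x) with _ | M
    · rw [PySem.List.max?_eq_none_iff] at h; exact absurd h hcne
    · exact ⟨M, rfl⟩
  -- B's groups dict, as a fold over (count, position) pairs in canonical shape
  set groups : PySem.Dict Int (List Int) :=
    (PySem.List.enumerate cnt 1).foldl
      (fun d pc => d.modify pc.2 [] (· ++ [pc.1])) PySem.Dict.empty with hgroups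
  have hgroups' : groups =
      ((PySem.List.enumerate cnt 1).map (fun pc => (pc.2, pc.1))).foldl
        (fun d p => d.modify p.1 [] (· ++ [p.2])) PySem.Dict.empty := by
    rw [hgroups, List.foldl_map]
  -- groups' keys are exactly the distinct counts, so max over keys = max over cnt
  have hkeys : PySem.Dict.keys groups = PySem.Set.ofList cnt := by
    rw [hgroups, PySem.Dict.keys_foldl_modify_key, PySem.Dict.keys_empty,
      PySem.Set.update_nil_left, PySem.List.map_snd_enumerate]
  have hmaxkeys : PySem.List.max? (PySem.Dict.keys groups) (fun x => x) = some M := by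
    rw [← hM]
    apply pvMax?_congr_mem
    intro x
    rw [hkeys, PySem.Set.mem_ofList]
  rw [hM, hmaxkeys]
  simp only
  by_cases h1 : M = 1
  · simp [h1]
  · simp only [h1, if_false, Option.some.injEq]
    -- the lookup groups[M]
    have hgetD : PySem.Dict.getD groups M [] =
        ((PySem.List.enumerate cnt 1).filter (fun p => p.2 == M)).map (·.1) := by
      rw [hgroups', PySem.Dict.getD_foldl_modify_append, PySem.Dict.getD_empty]
      rw [List.filter_map, List.map_map]
      rfl
    have hMmem : M ∈ PySem.Dict.keys groups := by
      rw [hkeys, PySem.Set.mem_ofList]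
      exact PySem.List.max?_mem hM
    have hget : PySem.Dict.get? groups M =
        some (((PySem.List.enumerate cnt 1).filter (fun p => p.2 == M)).map (·.1)) := by
      rcases hg : PySem.Dict.get? groups M with _ | v
      · rw [PySem.Dict.get?_eq_none_iff_not_mem_keys] at hg
        exact absurd hMmem hg
      · rw [← hgetD, PySem.Dict.getD_eq_get?_getD, hg]; rfl
    rw [hget]
    simp only
    rw [pvLoopA cnt M 0 []]
    simp
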